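-- pv_equiv track=rewrite | github.com/KellyGong/Vibe_Code_Research | vibe-research/scripts/paper-search/paper_search.py | find_matched_terms
-- ===== SOURCE A (Python) =====
-- def find_matched_terms(title_txt, abs_txt, filter_struct):
--     """Return list of matched keywords (one per group) based on provided filter_struct."""
--     if not filter_struct: return []
--     content = (title_txt + " " + abs_txt).lower()
--     matched = []
--     for group in filter_struct:
--         hit = None
--         for k in group:
--             clean_k = k.replace('"', '').replace("'", "").lower()
--             if clean_k and clean_k in content:
--                 hit = clean_k
--                 break
--         if hit: matched.append(hit)
--     return matched
-- ===== SOURCE B (Python) =====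
-- def find_matched_terms(title_txt, abs_txt, filter_struct):
--     """Sliding-window multi-pattern search: hash the distinct cleaned keywords,
--     then for each distinct keyword length slide a window of that length across
--     the content once, collecting every window that is a keyword; finally pick
--     each group's first collected keyword."""
--     content = (title_txt + " " + abs_txt).lower()
--
--     def clean(k):
--         return k.replace('"', '').replace("'", "").lower()
--
--     patterns = [p for p in dict.fromkeys(clean(k) for g in filter_struct for k in g) if p]
--     patset = set(patterns)
--     lengths = list(dict.fromkeys(len(p) for p in patterns))
--     present = set()
--     for L in lengths:
--         for j in range(len(content) - L + 1):
--             w = content[j:j + L]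
--             if w in patset:
--                 present.add(w)
--     out = []
--     for g in filter_struct:
--         for k in g:
--             c = clean(k)
--             if c in present:
--                 out.append(c)
--                 break
--     return out
-- ===== Notes on version B (the rewrite author's own statement) =====
-- stated objective: alternative
-- what changed: B replaces A's per-keyword 'in content' substring tests with a text-driven sliding-window multi-pattern search: it hashes the distinct cleaned keywords into a set, and for each distinct keyword length slides a window of that length across the content once, collecting every window that is a keyword; each group's first hit is then read off by set membership.
import Mathlib
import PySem

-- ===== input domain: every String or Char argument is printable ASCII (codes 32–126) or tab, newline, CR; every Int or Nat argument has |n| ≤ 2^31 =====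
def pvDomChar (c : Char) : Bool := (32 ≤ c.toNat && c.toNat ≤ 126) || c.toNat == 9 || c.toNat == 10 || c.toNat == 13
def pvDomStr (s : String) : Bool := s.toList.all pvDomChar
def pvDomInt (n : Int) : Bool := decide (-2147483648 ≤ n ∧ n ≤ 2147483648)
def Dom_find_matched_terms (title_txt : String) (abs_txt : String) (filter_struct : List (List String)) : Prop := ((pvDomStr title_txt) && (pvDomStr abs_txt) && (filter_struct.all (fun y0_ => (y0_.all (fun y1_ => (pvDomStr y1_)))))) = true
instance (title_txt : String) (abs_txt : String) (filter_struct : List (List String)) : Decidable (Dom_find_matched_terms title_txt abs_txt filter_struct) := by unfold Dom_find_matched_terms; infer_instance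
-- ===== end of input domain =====

-- B replaces A's per-keyword substring tests by a sliding-window multi-pattern search
-- (one window sweep per distinct keyword length against a hash set of the cleaned keywords),
-- then reads off each group's first hit (alternative algorithm; equivalence is about the return value).


-- ===== PORT A =====
-- inner 'for k in group: … break' loop of A
def pvAFindHit (content : String) : List String → Option String
  | [] => none
  | k :: rest =>
    let clean_k := PySem.Str.lower (PySem.Str.replace (PySem.Str.replace k "\"" "") "'" "")
    if clean_k != "" && PySem.Str.isIn clean_k content then some clean_k
    else pvAFindHit content rest

def find_matched_terms (title_txt : String) (abs_txt : String) (filter_struct : List (List String)) : List String :=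
  if filter_struct = [] then []
  else
    let content := PySem.Str.lower (PySem.Str.join "" [title_txt, " ", abs_txt])
    filter_struct.foldl (fun matched group =>
      match pvAFindHit content group with
      | some hit => matched ++ [hit]
      | none => matched) []

-- ===== PORT B =====
-- B's 'clean' helper
def pvClean (k : String) : String :=
  PySem.Str.lower (PySem.Str.replace (PySem.Str.replace k "\"" "") "'" "")

-- 'for j in range(len(content) - L + 1): w = content[j:j+L]; if w in patset: present.add(w)'
def pvWindowScan (content : List Char) (patset : PySem.Set (List Char)) (L : Int)
    (pr : PySem.Set (List Char)) : PySem.Set (List Char) :=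
  (PySem.List.pyRange 0 ((content.length : Int) - L + 1) 1).foldl (fun pr j =>
    let w := PySem.List.slice content (some j) (some (j + L))
    if PySem.Set.contains patset w then PySem.Set.add pr w else pr) pr

-- first keyword of a group whose cleaned form is in 'present' ('for k in g: … break')
def pvBFirst (present : PySem.Set (List Char)) : List String → Option String
  | [] => none
  | k :: rest =>
    if PySem.Set.contains present (pvClean k).toList then some (pvClean k)
    else pvBFirst present rest

-- B's strings are carried as List Char (the PySem.Chars side of the string API)
def find_matched_terms_alt (title_txt : String) (abs_txt : String) (filter_struct : List (List String)) : List String :=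
  let content := PySem.Chars.lower (title_txt.toList ++ [' '] ++ abs_txt.toList)
  let patterns := (PySem.List.dedup (filter_struct.flatMap (fun g => g.map (fun k => (pvClean k).toList)))).filter (fun p => p != [])
  let patset : PySem.Set (List Char) := PySem.Set.ofList patterns
  let lengths := PySem.List.dedup (patterns.map (fun p => (p.length : Int)))
  let present := lengths.foldl (fun pr L => pvWindowScan content patset L pr) PySem.Set.empty
  filter_struct.foldl (fun out g =>
    match pvBFirst present g with
    | some c => out ++ [c]
    | none => out) []

-- ===== PRECONDITION & SPEC =====
def Spec_find_matched_terms (title_txt : String) (abs_txt : String) (filter_struct : List (List String)) (out : List String) : Prop := out = find_matched_terms_alt title_txt abs_txt filter_struct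
instance (title_txt : String) (abs_txt : String) (filter_struct : List (List String)) (out : List String) : Decidable (Spec_find_matched_terms title_txt abs_txt filter_struct out) := by unfold Spec_find_matched_terms; infer_instance

-- ===== CLAIM (what is proved, stated in full; the proofs are below) =====
def Claim_equal_find_matched_terms : Prop := ∀ (title_txt : String) (abs_txt : String) (filter_struct : List (List String)), Dom_find_matched_terms title_txt abs_txt filter_struct → Spec_find_matched_terms title_txt abs_txt filter_struct (find_matched_terms title_txt abs_txt filter_struct)

-- ===== LEMMAS AND PROOFS =====

-- membership after one window sweep at a fixed length
theorem pv_mem_winfold (content : List Char) (patset : PySem.Set (List Char)) (L : Int)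
    (js : List Int) (pr : PySem.Set (List Char)) (x : List Char) :
    x ∈ js.foldl (fun pr j =>
        let w := PySem.List.slice content (some j) (some (j + L))
        if PySem.Set.contains patset w then PySem.Set.add pr w else pr) pr ↔
      x ∈ pr ∨ (x ∈ patset ∧ ∃ j ∈ js, PySem.List.slice content (some j) (some (j + L)) = x) := by
  induction js generalizing pr with
  | nil => simp
  | cons j rest ih =>
    simp only [List.foldl_cons]
    rw [ih]
    by_cases hc : PySem.List.slice content (some j) (some (j + L)) ∈ patset
    · rw [if_pos ((PySem.Set.contains_iff _ _).2 hc)]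
      simp only [PySem.Set.mem_add, List.mem_cons]
      constructor
      · rintro ((h | rfl) | ⟨hp, j', hj', hs⟩)
        exacts [Or.inl h, Or.inr ⟨hc, j, Or.inl rfl, rfl⟩,
                Or.inr ⟨hp, j', Or.inr hj', hs⟩]
      · rintro (h | ⟨hp, j', (rfl | hj''), hs⟩)
        exacts [Or.inl (Or.inl h), Or.inl (Or.inr hs.symm), Or.inr ⟨hp, j', hj'', hs⟩]
    · rw [if_neg (by simp [hc])]
      constructor
      · rintro (h | ⟨hp, j', hj', hs⟩)
        exacts [Or.inl h, Or.inr ⟨hp, j', List.mem_cons_of_mem _ hj', hs⟩]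
      · rintro (h | ⟨hp, j', hj', hs⟩)
        · exact Or.inl h
        · rcases List.mem_cons.1 hj' with rfl | hj''
          · exact absurd (hs ▸ hp) hc
          · exact Or.inr ⟨hp, j', hj'', hs⟩

-- membership after the sweeps over all the distinct lengths
theorem pv_mem_sweep (content : List Char) (patset : PySem.Set (List Char))
    (Ls : List Int) (pr : PySem.Set (List Char)) (x : List Char) :
    x ∈ Ls.foldl (fun pr L => pvWindowScan content patset L pr) pr ↔
      x ∈ pr ∨ ∃ L ∈ Ls, x ∈ patset ∧
        ∃ j ∈ PySem.List.pyRange 0 ((content.length : Int) - L + 1) 1,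
          PySem.List.slice content (some j) (some (j + L)) = x := by
  induction Ls generalizing pr with
  | nil => simp
  | cons L rest ih =>
    simp only [List.foldl_cons]
    rw [ih]
    unfold pvWindowScan
    rw [pv_mem_winfold]
    constructor
    · rintro ((h | ⟨hp, hj⟩) | ⟨L', hL', hp, hj⟩)
      exacts [Or.inl h, Or.inr ⟨L, List.mem_cons_self, hp, hj⟩,
              Or.inr ⟨L', List.mem_cons_of_mem _ hL', hp, hj⟩]
    · rintro (h | ⟨L', hL', hp, hj⟩)
      · exact Or.inl (Or.inl h)
      · rcases List.mem_cons.1 hL' with rfl | hL''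
        · exact Or.inl (Or.inr ⟨hp, hj⟩)
        · exact Or.inr ⟨L', hL'', hp, hj⟩

-- a pattern is collected by some window sweep iff it occurs in the content
theorem pv_occurs (content : List Char) (patterns : List (List Char)) (x : List Char)
    (hxl : x ≠ []) (hxp : x ∈ patterns) :
    (∃ L ∈ PySem.List.dedup (patterns.map (fun p => (p.length : Int))),
        x ∈ PySem.Set.ofList patterns ∧
        ∃ j ∈ PySem.List.pyRange 0 ((content.length : Int) - L + 1) 1,
          PySem.List.slice content (some j) (some (j + L)) = x) ↔
      PySem.Chars.isIn x content = true := by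
  rw [← PySem.Chars.exists_prefix_drop_iff_isIn]
  constructor
  · rintro ⟨L, hL, _, j, hj, hs⟩
    have hL0 : 0 ≤ L := by
      rcases List.mem_map.1 ((PySem.List.mem_dedup _ _).1 hL) with ⟨p, _, rfl⟩
      exact Int.natCast_nonneg _
    have hj0 : 0 ≤ j := ((PySem.List.mem_pyRange_one).1 hj).1
    rw [PySem.List.slice_toNat content (by omega) (by omega)] at hs
    exact ⟨j.toNat, hs ▸ List.take_prefix _ _⟩
  · rintro ⟨m, hp⟩
    have hmn : m + x.length ≤ content.length := by
      by_cases hm : m ≤ content.length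
      · have := hp.length_le
        rw [List.length_drop] at this
        omega
      · rw [List.drop_eq_nil_of_le (by omega)] at hp
        exact absurd (List.prefix_nil.1 hp) hxl
    refine ⟨(x.length : Int),
      (PySem.List.mem_dedup _ _).2 (List.mem_map.2 ⟨x, hxp, rfl⟩),
      (PySem.Set.mem_ofList _ _).2 hxp,
      (m : Int), ?_, ?_⟩
    · rw [PySem.List.mem_pyRange_one]
      constructor
      · exact Int.natCast_nonneg m
      · omega
    · rw [PySem.List.slice_natCast_add]
      exact (List.prefix_iff_eq_take.1 hp).symm

-- membership in B's 'present' set coincides with A's occurrence test, for keywords of filter_struct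
theorem pv_contains_present (content : List Char) (filter_struct : List (List String))
    (k : String) (hk : ∃ g ∈ filter_struct, k ∈ g) :
    PySem.Set.contains
      ((PySem.List.dedup
          (((PySem.List.dedup (filter_struct.flatMap (fun g => g.map (fun k => (pvClean k).toList)))).filter (fun p => p != [])).map
            (fun p => (p.length : Int)))).foldl
        (fun pr L => pvWindowScan content
          (PySem.Set.ofList ((PySem.List.dedup (filter_struct.flatMap (fun g => g.map (fun k => (pvClean k).toList)))).filter (fun p => p != []))) L pr)
        PySem.Set.empty)
      (pvClean k).toList
      = (pvClean k != "" && PySem.Chars.isIn (pvClean k).toList content) := by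
  obtain ⟨g, hg, hkg⟩ := hk
  have hmem : (pvClean k).toList ∈ PySem.List.dedup (filter_struct.flatMap (fun g => g.map (fun k => (pvClean k).toList))) :=
    (PySem.List.mem_dedup _ _).2 (List.mem_flatMap.2 ⟨g, hg, List.mem_map.2 ⟨k, hkg, rfl⟩⟩)
  by_cases hne : pvClean k = ""
  · rw [hne]
    simp only [bne_self_eq_false, Bool.false_and]
    apply Bool.eq_false_iff.2
    intro hc
    have := (pv_mem_sweep _ _ _ _ _).1 ((PySem.Set.contains_iff _ _).1 hc)
    rcases this with h | ⟨_, _, hb, _⟩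
    · simp [PySem.Set.empty] at h
    · have := (List.mem_filter.1 ((PySem.Set.mem_ofList _ _).1 hb)).2
      simp at this
  · have hxl : (pvClean k).toList ≠ [] := fun h => hne (String.toList_eq_nil_iff.mp h)
    have hpat : (pvClean k).toList ∈ (PySem.List.dedup (filter_struct.flatMap (fun g => g.map (fun k => (pvClean k).toList)))).filter (fun p => p != []) :=
      List.mem_filter.2 ⟨hmem, by simp [hxl]⟩
    by_cases hin : PySem.Chars.isIn (pvClean k).toList content = true
    · rw [hin]
      simp only [Bool.and_true]
      rw [show ((pvClean k != "") = true) from by simp [hne]]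
      apply (PySem.Set.contains_iff _ _).2
      rw [pv_mem_sweep]
      exact Or.inr ((pv_occurs content _ _ hxl hpat).2 hin)
    · rw [Bool.eq_false_iff.2 hin]
      simp only [Bool.and_false]
      apply Bool.eq_false_iff.2
      intro hc
      have := (pv_mem_sweep _ _ _ _ _).1 ((PySem.Set.contains_iff _ _).1 hc)
      rcases this with h | hocc
      · simp [PySem.Set.empty] at h
      · exact hin ((pv_occurs content _ _ hxl hpat).1 hocc)

-- the two content strings agree (A's string-level concat+lower vs B's list-level one)
theorem pv_content_eq (t a : String) :
    (PySem.Str.lower (PySem.Str.join "" [t, " ", a])).toList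
      = PySem.Chars.lower (t.toList ++ [' '] ++ a.toList) := by
  simp [PySem.Str.toList_lower, PySem.Str.toList_join, PySem.Chars.join, List.intercalate]

-- A's inner loop equals B's first-hit lookup when 'present' answers like A's test
theorem pv_findHit_eq (contentS : String) (present : PySem.Set (List Char))
    (g : List String)
    (hp : ∀ k ∈ g, PySem.Set.contains present (pvClean k).toList
            = (pvClean k != "" && PySem.Str.isIn (pvClean k) contentS)) :
    pvAFindHit contentS g = pvBFirst present g := by
  induction g with
  | nil => rfl
  | cons k rest ih =>
    simp only [pvAFindHit, pvBFirst]
    rw [show PySem.Str.lower (PySem.Str.replace (PySem.Str.replace k "\"" "") "'" "") = pvClean k from rfl]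
    rw [hp k List.mem_cons_self]
    by_cases h : (pvClean k != "" && PySem.Str.isIn (pvClean k) contentS) = true
    · rw [if_pos h, if_pos h]
    · rw [if_neg h, if_neg h]
      exact ih (fun k' hk' => hp k' (List.mem_cons_of_mem _ hk'))

-- ===== VERDICT (by name: the statement is the Claim_ definition above) =====
theorem find_matched_terms_spec : Claim_equal_find_matched_terms := by
  intro title_txt abs_txt filter_struct _
  unfold Spec_find_matched_terms find_matched_terms find_matched_terms_alt
  by_cases hfs : filter_struct = []
  · subst hfs; rfl
  · rw [if_neg hfs]
    apply PySem.List.foldl_congr_mem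
    intro acc g hg
    rw [pv_findHit_eq _ _ g (fun k hk => ?_)]
    rw [pv_contains_present _ filter_struct k ⟨g, hg, hk⟩, PySem.Str.isIn_eq, pv_content_eq]
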